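-- pv_equiv track=rewrite | github.com/byeong-chang/Baekjoon-programmers | 프로그래머스/lv0/120869. 외계어 사전/외계어 사전.py | solution
-- ===== SOURCE A (Python) =====
-- def solution(spell, dic):
--     for text in dic:
--         Flag = True
--         temp = spell.copy()
--
--         if len(text) != len(spell):
--             continue
--
--         for i in text:
--             if i in temp:
--                 temp.remove(i)
--             else:
--                 Flag = False
--                 break
--         if Flag:
--             return 1
--     return 2
-- ===== SOURCE B (Python) =====
-- def solution(spell, dic):
--     target = sorted(spell)
--     for text in dic:
--         if sorted(text) == target:
--             return 1
--     return 2
-- ===== Notes on version B (the rewrite author's own statement) =====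
-- stated objective: faster
-- what changed: Replaces the per-text copy/membership/remove consumption loop (with Flag, break and explicit length check) by a sort-and-compare: return 1 on the first text whose sorted character list equals the pre-sorted spell.
import Mathlib
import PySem

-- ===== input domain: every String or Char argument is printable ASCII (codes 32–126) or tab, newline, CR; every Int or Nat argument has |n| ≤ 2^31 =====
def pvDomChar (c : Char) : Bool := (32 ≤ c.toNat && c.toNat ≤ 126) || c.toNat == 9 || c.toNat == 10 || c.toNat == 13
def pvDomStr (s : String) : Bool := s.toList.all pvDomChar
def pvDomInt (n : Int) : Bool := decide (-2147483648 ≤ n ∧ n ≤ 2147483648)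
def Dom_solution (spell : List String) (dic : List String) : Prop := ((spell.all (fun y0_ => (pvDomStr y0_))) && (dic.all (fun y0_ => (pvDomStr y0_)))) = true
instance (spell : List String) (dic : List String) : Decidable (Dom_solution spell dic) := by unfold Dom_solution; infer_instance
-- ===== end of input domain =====

-- B replaces A's consume-by-remove scan with a sort-and-compare of canonical forms (idiomatic rewrite).
-- ===== PORT A =====
-- inner loop of A: 'for i in text: if i in temp: temp.remove(i) else: Flag=False; break'
def solInner (cs : List Char) (temp : List String) : Bool :=
  match cs with
  | [] => true
  | c :: rest =>
    match PySem.List.remove? temp (String.mk [c]) with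
    | some t => solInner rest t
    | none => false

def solGoA (spell : List String) (dic : List String) : Int :=
  match dic with
  | [] => 2
  | text :: rest =>
    if text.toList.length ≠ spell.length then solGoA spell rest
    else if solInner text.toList spell then 1 else solGoA spell rest

def solution (spell : List String) (dic : List String) : Int := solGoA spell dic

-- ===== PORT B =====
def solGoB (target : List String) (dic : List String) : Int :=
  match dic with
  | [] => 2
  | text :: rest =>
    if PySem.List.sorted (text.toList.map (fun c => String.mk [c])) (fun x => x) false = target
    then 1 else solGoB target rest

def solution_alt (spell : List String) (dic : List String) : Int :=
  solGoB (PySem.List.sorted spell (fun x => x) false) dic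

-- ===== PRECONDITION & SPEC =====
def Spec_solution (spell : List String) (dic : List String) (out : Int) : Prop := out = solution_alt spell dic
instance (spell : List String) (dic : List String) (out : Int) : Decidable (Spec_solution spell dic out) := by unfold Spec_solution; infer_instance

-- ===== CLAIM (what is proved, stated in full; the proofs are below) =====
def Claim_equal_solution : Prop := ∀ (spell : List String) (dic : List String), Dom_solution spell dic → Spec_solution spell dic (solution spell dic)

-- ===== LEMMAS AND PROOFS =====

-- A's inner consumption loop succeeds iff the singleton strings of cs are a sub-permutation;
-- together with equal lengths this is exactly a permutation.
lemma solInner_iff_perm (cs : List Char) (temp : List String)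
    (hlen : cs.length = temp.length) :
    solInner cs temp = true ↔ (cs.map (fun c => String.mk [c])).Perm temp := by
  induction cs generalizing temp with
  | nil =>
    simp only [solInner, List.map_nil, true_iff]
    have h0 : temp = [] := List.eq_nil_of_length_eq_zero (by simpa using hlen.symm)
    subst h0; exact List.Perm.refl _
  | cons c rest ih =>
    simp only [solInner, List.map_cons]
    by_cases hmem : String.mk [c] ∈ temp
    · rw [PySem.List.remove?_eq_some_erase temp _ hmem]
      have hlen' : rest.length = (temp.erase (String.mk [c])).length := by
        rw [List.length_erase_of_mem hmem]; simp at hlen; omega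
      rw [ih _ hlen']
      constructor
      · intro hp
        exact (List.cons_perm_iff_perm_erase.mpr ⟨hmem, hp⟩)
      · intro hp
        exact (List.cons_perm_iff_perm_erase.mp hp).2
    · rw [(PySem.List.remove?_eq_none_iff temp (String.mk [c])).mpr hmem]
      simp
      intro hp
      exact hmem (hp.subset (by simp))

lemma per_text (spell : List String) (text : String) :
    ((¬ text.toList.length ≠ spell.length) ∧ solInner text.toList spell = true) ↔
      PySem.List.sorted (text.toList.map (fun c => String.mk [c])) (fun x => x) false
        = PySem.List.sorted spell (fun x => x) false := by
  rw [PySem.List.sorted_id_eq_sorted_id_iff_perm]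
  constructor
  · rintro ⟨hlen, hin⟩
    exact (solInner_iff_perm _ _ (by omega)).mp hin
  · intro hp
    have hlen : text.toList.length = spell.length := by
      simpa using hp.length_eq
    exact ⟨by omega, (solInner_iff_perm _ _ hlen).mpr hp⟩

lemma go_eq (spell : List String) (dic : List String) :
    solGoA spell dic = solGoB (PySem.List.sorted spell (fun x => x) false) dic := by
  induction dic with
  | nil => rfl
  | cons text rest ih =>
    simp only [solGoA, solGoB]
    by_cases hs : PySem.List.sorted (text.toList.map (fun c => String.mk [c])) (fun x => x) false
        = PySem.List.sorted spell (fun x => x) false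
    · obtain ⟨hlen, hin⟩ := (per_text spell text).mpr hs
      rw [if_neg hlen, if_pos hin, if_pos hs]
    · rw [if_neg hs]
      by_cases hlen : text.toList.length ≠ spell.length
      · rw [if_pos hlen]; exact ih
      · rw [if_neg hlen]
        have : ¬ solInner text.toList spell = true := fun hin => hs ((per_text spell text).mp ⟨hlen, hin⟩)
        simp only [this]
        exact ih

-- ===== VERDICT (by name: the statement is the Claim_ definition above) =====
theorem solution_spec : Claim_equal_solution := by
  intro spell dic _
  unfold Spec_solution solution solution_alt
  exact go_eq spell dic
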